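-- pv_equiv track=rewrite | github.com/AlexandrFedorow/Sharaga | SVO.py | make_coords
-- ===== SOURCE A (Python) =====
-- def make_coords(r, h, hi, hd, hpvo, ch):
--     coords = [[0],[hi]]
--     if hpvo == 0:
--         for i in range(len(r)):
--             coords[0].append(coords[0][i]+r[i])
--             if ch:
--                 coords[1].append(hd)
--                 ch = False
--             else:
--                 coords[1].append(0)
--                 ch = True
--     else:
--         for i in range(len(r)):
--             coords[0].append(coords[0][i]+r[i])
--             if ch:
--                 coords[1].append(hpvo)
--                 ch = False
--             else:
--                 coords[1].append(hd)
--                 ch = True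
--
--     return coords
-- ===== SOURCE B (Python) =====
-- def make_coords(r, h, hi, hd, hpvo, ch):
--     # x-coords built BACK-TO-FRONT: start from the total sum and subtract
--     # each element walking the list in reverse, then reverse the result.
--     xs = []
--     s = sum(r)
--     for v in reversed(r):
--         xs.append(s)
--         s -= v
--     xs.append(0)
--     xs.reverse()
--     # y-coords: tile a fixed 2-element pattern and truncate to length.
--     on, off = (hd, 0) if hpvo == 0 else (hpvo, hd)
--     pat = [on, off] if ch else [off, on]
--     ys = [hi] + (pat * ((len(r) + 1) // 2))[:len(r)]
--     return [xs, ys]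
-- ===== Notes on version B (the rewrite author's own statement) =====
-- stated objective: alternative
-- what changed: Instead of one stateful loop growing both lists with a toggled flag, B builds the x-coords back-to-front by subtracting elements from the total sum (reverse traversal, then a reverse), and builds the y-coords by tiling a fixed 2-element pattern and truncating, with no per-step state at all.
import Mathlib
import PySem

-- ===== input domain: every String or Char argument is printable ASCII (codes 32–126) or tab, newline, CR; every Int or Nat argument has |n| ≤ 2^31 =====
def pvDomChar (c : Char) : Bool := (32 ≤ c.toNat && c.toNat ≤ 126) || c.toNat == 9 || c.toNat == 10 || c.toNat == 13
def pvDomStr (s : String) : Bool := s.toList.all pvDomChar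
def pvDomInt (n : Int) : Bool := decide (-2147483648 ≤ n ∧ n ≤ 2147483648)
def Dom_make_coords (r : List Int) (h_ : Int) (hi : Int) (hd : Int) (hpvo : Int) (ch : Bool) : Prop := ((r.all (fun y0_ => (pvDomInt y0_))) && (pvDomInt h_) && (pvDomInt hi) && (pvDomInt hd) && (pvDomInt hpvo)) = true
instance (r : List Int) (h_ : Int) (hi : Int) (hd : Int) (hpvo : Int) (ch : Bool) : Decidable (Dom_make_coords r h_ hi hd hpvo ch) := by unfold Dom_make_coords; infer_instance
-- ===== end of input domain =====

-- B replaces A's single stateful toggle loop by a back-to-front subtraction pass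
-- for the x-coords and a tiled-pattern truncation for the y-coords; objective: alternative.

-- ===== PORT A =====
-- one loop iteration of A: append the prefix value to coords[0], then branch on ch
def mcStep (r : List Int) (onv offv : Int) (s : List Int × List Int × Bool) (i : Int) :
    List Int × List Int × Bool :=
  let xs' := s.1 ++ [PySem.List.pyGetD s.1 i 0 + PySem.List.pyGetD r i 0]
  if s.2.2 then (xs', s.2.1 ++ [onv], false) else (xs', s.2.1 ++ [offv], true)

def make_coords (r : List Int) (h_ : Int) (hi : Int) (hd : Int) (hpvo : Int) (ch : Bool) : List (List Int) :=
  let init : List Int × List Int × Bool := ([0], [hi], ch)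
  let s :=
    if hpvo = 0 then
      (PySem.List.pyRange 0 (r.length : Int) 1).foldl (mcStep r hd 0) init
    else
      (PySem.List.pyRange 0 (r.length : Int) 1).foldl (mcStep r hpvo hd) init
  [s.1, s.2.1]

-- ===== PORT B =====
def make_coords_alt (r : List Int) (h_ : Int) (hi : Int) (hd : Int) (hpvo : Int) (ch : Bool) : List (List Int) :=
  -- for v in reversed(r): xs.append(s); s -= v   — then xs.append(0); xs.reverse()
  let st := r.reverse.foldl (fun (st : List Int × Int) v => (st.1 ++ [st.2], st.2 - v)) ([], r.sum)
  let xs := (st.1 ++ [0]).reverse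
  let p : Int × Int := if hpvo = 0 then (hd, 0) else (hpvo, hd)
  let pat : List Int := if ch then [p.1, p.2] else [p.2, p.1]
  -- (pat * ((len(r)+1)//2))[:len(r)]  — tile then truncate (slice bound is nonnegative, so take is exact)
  let ys := hi :: (List.flatten (List.replicate ((r.length + 1) / 2) pat)).take r.length
  [xs, ys]

-- ===== PRECONDITION & SPEC =====
def Spec_make_coords (r : List Int) (h_ : Int) (hi : Int) (hd : Int) (hpvo : Int) (ch : Bool) (out : List (List Int)) : Prop := out = make_coords_alt r h_ hi hd hpvo ch
instance (r : List Int) (h_ : Int) (hi : Int) (hd : Int) (hpvo : Int) (ch : Bool) (out : List (List Int)) : Decidable (Spec_make_coords r h_ hi hd hpvo ch out) := by unfold Spec_make_coords; infer_instance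

-- ===== CLAIM (what is proved, stated in full; the proofs are below) =====
def Claim_equal_make_coords : Prop := ∀ (r : List Int) (h_ : Int) (hi : Int) (hd : Int) (hpvo : Int) (ch : Bool), Dom_make_coords r h_ hi hd hpvo ch → Spec_make_coords r h_ hi hd hpvo ch (make_coords r h_ hi hd hpvo ch)

-- ===== LEMMAS AND PROOFS =====

-- proof-side spec: forward prefix sums starting at a
def accum (a : Int) : List Int → List Int
  | [] => [a]
  | v :: t => a :: accum (a + v) t

-- proof-side spec: alternating list of length n starting with u
def altL : Nat → Int → Int → List Int
  | 0, _, _ => []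
  | n + 1, u, v => u :: altL n v u

theorem accum_getD_length (a : Int) (l : List Int) :
    (accum a l).getD l.length 0 = a + l.sum := by
  induction l generalizing a with
  | nil => simp [accum]
  | cons v t ih =>
    simp only [accum, List.length_cons, List.getD_cons_succ, List.sum_cons, ih, add_assoc]

theorem accum_append (a : Int) (l : List Int) (v : Int) :
    accum a (l ++ [v]) = accum a l ++ [a + l.sum + v] := by
  induction l generalizing a with
  | nil => simp [accum]
  | cons x t ih =>
    simp only [List.cons_append, accum, ih, List.sum_cons]
    ring_nf

theorem altL_snoc (n : Nat) (u v : Int) :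
    altL (n + 1) u v = altL n u v ++ [if n % 2 = 0 then u else v] := by
  induction n generalizing u v with
  | zero => simp [altL]
  | succ n ih =>
    have h : altL (n + 2) u v = u :: altL (n + 1) v u := rfl
    rw [h, ih]
    by_cases h2 : n % 2 = 0
    · have : ¬ ((n + 1) % 2 = 0) := by omega
      simp [altL, h2, this]
    · have : (n + 1) % 2 = 0 := by omega
      simp [altL, h2, this]

-- characterization of A's loop after n steps
theorem mc_loop (r : List Int) (onv offv hi : Int) (c : Bool) :
    ∀ n : Nat, n ≤ r.length →
    (PySem.List.pyRange 0 (n : Int) 1).foldl (mcStep r onv offv) ([0], [hi], c)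
      = (accum 0 (r.take n),
         hi :: altL n (cond c onv offv) (cond c offv onv),
         decide (n % 2 = 0) == c) := by
  intro n hn
  induction n with
  | zero => simp [accum, altL]
  | succ n ih =>
    have hn' : n ≤ r.length := Nat.le_of_succ_le hn
    have hlt : n < r.length := hn
    have hsplit : PySem.List.pyRange 0 ((n + 1 : Nat) : Int) 1
        = PySem.List.pyRange 0 (n : Int) 1 ++ [(n : Int)] := by
      push_cast
      exact PySem.List.pyRange_one_succ_right (by positivity)
    rw [hsplit, List.foldl_append, ih hn']
    have htake : r.take (n + 1) = r.take n ++ [r[n]] := by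
      rw [List.take_add_one]
      simp [List.getElem?_eq_getElem hlt]
    have hxs : PySem.List.pyGetD (accum 0 (r.take n)) (n : Int) 0 = 0 + (r.take n).sum := by
      rw [PySem.List.pyGetD_natCast]
      have : (r.take n).length = n := by simp [hn']
      calc (accum 0 (r.take n)).getD n 0
          = (accum 0 (r.take n)).getD (r.take n).length 0 := by rw [this]
        _ = 0 + (r.take n).sum := accum_getD_length 0 (r.take n)
    have hr : PySem.List.pyGetD r (n : Int) 0 = r[n] := by
      rw [PySem.List.pyGetD_natCast]
      exact List.getD_eq_getElem r 0 hlt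
    have hpar : ∀ b : Bool, (!(decide (n % 2 = 0) == b)) = (decide ((n + 1) % 2 = 0) == b) := by
      intro b
      by_cases h2 : n % 2 = 0
      · have : ¬ ((n + 1) % 2 = 0) := by omega
        cases b <;> simp [h2, this]
      · have : (n + 1) % 2 = 0 := by omega
        cases b <;> simp [h2, this]
    simp only [mcStep, List.foldl_cons, List.foldl_nil, hxs, hr, htake, accum_append,
      altL_snoc n]
    by_cases h2 : n % 2 = 0 <;> cases c <;>
      simp [h2, Nat.succ_mod_two_eq_zero_iff] <;> omega

-- B's back-to-front x pass equals the forward prefix sums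
theorem bxs_eq_accum (r : List Int) :
    ((r.reverse.foldl (fun (st : List Int × Int) v => (st.1 ++ [st.2], st.2 - v)) ([], r.sum)).1
        ++ [0]).reverse = accum 0 r := by
  induction r using List.reverseRecOn with
  | nil => simp [accum]
  | append_singleton r v ih =>
    have hfold : ∀ (l : List Int) (acc : List Int) (s : Int),
        l.foldl (fun (st : List Int × Int) v => (st.1 ++ [st.2], st.2 - v)) (acc, s)
          = (acc ++ (l.foldl (fun (st : List Int × Int) v => (st.1 ++ [st.2], st.2 - v)) ([], s)).1,
             (l.foldl (fun (st : List Int × Int) v => (st.1 ++ [st.2], st.2 - v)) ([], s)).2) := by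
      intro l
      induction l with
      | nil => simp
      | cons x t iht =>
        intro acc s
        simp only [List.foldl_cons]
        rw [iht (acc ++ [s]), iht ([] ++ [s])]
        simp
    have hrev : (r ++ [v]).reverse = v :: r.reverse := by simp
    rw [hrev]
    simp only [List.foldl_cons, List.sum_append, List.sum_cons, List.sum_nil]
    rw [hfold]
    have : r.sum + (v + 0) - v = r.sum := by ring
    rw [this]
    rw [accum_append]
    rw [← ih]
    simp

-- B's tiled pattern truncated to n equals the alternating list
theorem tile_eq_altL (u v : Int) : ∀ (k n : Nat), n ≤ 2 * k →
    (List.flatten (List.replicate k [u, v])).take n = altL n u v := by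
  intro k
  induction k with
  | zero => intro n hn; interval_cases n; simp [altL]
  | succ k ih =>
    intro n hn
    match n with
    | 0 => simp [altL]
    | 1 => simp [List.replicate_succ, altL]
    | m + 2 =>
      have hm : m ≤ 2 * k := by omega
      simp only [List.replicate_succ, List.flatten_cons, List.cons_append, List.nil_append,
        List.take_succ_cons, ih m hm]
      rfl

theorem make_coords_spec : Claim_equal_make_coords := by
  intro r h_ hi hd hpvo ch _
  unfold Spec_make_coords make_coords make_coords_alt
  have hn : r.length ≤ 2 * ((r.length + 1) / 2) := by omega
  have hxs := bxs_eq_accum r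
  simp only [List.foldl_reverse, List.reverse_append, List.reverse_cons, List.reverse_nil,
    List.nil_append, List.cons_append] at hxs
  by_cases h0 : hpvo = 0 <;>
    cases ch <;>
      simp [h0, mc_loop r _ _ hi _ r.length le_rfl, tile_eq_altL _ _ _ _ hn,
        List.take_length, ← hxs]
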